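-- pv_equiv track=rewrite | github.com/ArunBNiah/venue-intel | src/venue_intel/scoring.py | _determine_primary_type
-- ===== SOURCE A (Python) =====
-- def _determine_primary_type(types: list[str]) -> str:
--     """Determine the primary venue type from Google types list.
--
--     Returns the most relevant type for our purposes.
--     """
--     if not types:
--         return "unknown"
--
--     # Priority order for premium spirits relevance
--     priority_types = [
--         "cocktail_bar", "wine_bar", "bar", "lounge",
--         "fine_dining_restaurant", "restaurant",
--         "hotel", "boutique_hotel", "resort_hotel",
--         "night_club", "pub", "cafe",
--     ]
--
--     for ptype in priority_types:
--         if ptype in types: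
--             return ptype
--
--     # Fall back to first type
--     return types[0]
-- ===== SOURCE B (Python) =====
-- def _determine_primary_type(types: list[str]) -> str:
--     """Determine the primary venue type from Google types list.
--
--     Single pass over `types` consulting a precomputed rank table.
--     """
--     if not types:
--         return "unknown"
--
--     priority_types = [
--         "cocktail_bar", "wine_bar", "bar", "lounge",
--         "fine_dining_restaurant", "restaurant",
--         "hotel", "boutique_hotel", "resort_hotel",
--         "night_club", "pub", "cafe",
--     ]
--     rank = {t: i for i, t in enumerate(priority_types)}
--
--     best = None  # (type, rank) with the smallest rank seen so far
--     for t in types: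
--         r = rank.get(t)
--         if r is not None and (best is None or r < best[1]):
--             best = (t, r)
--
--     return best[0] if best is not None else types[0]
-- ===== Notes on version B (the rewrite author's own statement) =====
-- stated objective: faster
-- what changed: Instead of scanning the 12-entry priority list and testing membership of each priority in `types`, B precomputes a rank dictionary from the priority list and makes a single pass over `types`, keeping the element with the smallest rank (first update wins on no smaller rank), with the same types[0] fallback. (measured ~1.7x faster at the largest generated size: one dict lookup per element instead of up to 12 list-membership scans).
import Mathlib
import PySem

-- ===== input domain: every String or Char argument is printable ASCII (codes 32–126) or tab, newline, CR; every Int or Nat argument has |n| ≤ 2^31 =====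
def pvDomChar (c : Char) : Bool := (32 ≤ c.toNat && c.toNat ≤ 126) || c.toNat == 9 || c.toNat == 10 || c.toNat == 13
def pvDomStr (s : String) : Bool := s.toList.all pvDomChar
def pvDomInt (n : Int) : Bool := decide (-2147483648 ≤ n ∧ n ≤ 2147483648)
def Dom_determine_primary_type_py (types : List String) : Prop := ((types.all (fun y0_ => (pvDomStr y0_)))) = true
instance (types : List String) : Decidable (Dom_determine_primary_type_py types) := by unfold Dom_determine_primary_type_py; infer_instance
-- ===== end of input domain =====

-- B replaces A's scan of the fixed priority list (a membership test over `types` per priority) by a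
-- single pass over `types` with a precomputed rank dictionary, tracking the best-ranked element.


-- ===== PORT A =====
def pvPrioA : List String :=
  ["cocktail_bar", "wine_bar", "bar", "lounge",
   "fine_dining_restaurant", "restaurant",
   "hotel", "boutique_hotel", "resort_hotel",
   "night_club", "pub", "cafe"]

-- the 'for ptype in priority_types: if ptype in types: return ptype' loop
def pvScan (types : List String) : List String → Option String
  | [] => none
  | p :: ps => if types.contains p then some p else pvScan types ps

def determine_primary_type_py (types : List String) : String :=
  match types with
  | [] => "unknown"
  | t0 :: ts =>
    match pvScan (t0 :: ts) pvPrioA with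
    | some p => p
    | none => t0

-- ===== PORT B =====
def pvPrioB : List String :=
  ["cocktail_bar", "wine_bar", "bar", "lounge",
   "fine_dining_restaurant", "restaurant",
   "hotel", "boutique_hotel", "resort_hotel",
   "night_club", "pub", "cafe"]

-- rank = {t: i for i, t in enumerate(priority_types)}
def pvRank : PySem.Dict String Int :=
  (PySem.List.enumerate pvPrioB).foldl (fun d it => d.insert it.2 it.1) PySem.Dict.empty

-- r = rank.get(t); if r is not None and (best is None or r < best[1]): best = (t, r)
def pvStep (b : Option (String × Int)) (t : String) : Option (String × Int) :=
  match pvRank.get? t with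
  | none => b
  | some r =>
    match b with
    | none => some (t, r)
    | some (_, br) => if r < br then (t, r) else b

def determine_primary_type_py_alt (types : List String) : String :=
  match types with
  | [] => "unknown"
  | t0 :: ts =>
    match (t0 :: ts).foldl pvStep none with
    | some (bt, _) => bt
    | none => t0

-- ===== PRECONDITION & SPEC =====
def Spec_determine_primary_type_py (types : List String) (out : String) : Prop := out = determine_primary_type_py_alt types
instance (types : List String) (out : String) : Decidable (Spec_determine_primary_type_py types out) := by unfold Spec_determine_primary_type_py; infer_instance

-- ===== CLAIM (what is proved, stated in full; the proofs are below) =====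
def Claim_equal_determine_primary_type_py : Prop := ∀ (types : List String), Dom_determine_primary_type_py types → Spec_determine_primary_type_py types (determine_primary_type_py types)

-- ===== LEMMAS AND PROOFS =====

-- reference model for pvRank.get?: first index (from i) of t in the list
def pvRankOf : List String → Int → String → Option Int
  | [], _, _ => none
  | p :: ps, i, t => if p = t then some i else pvRankOf ps (i + 1) t

theorem pvRank_get?_eq (t : String) : pvRank.get? t = pvRankOf pvPrioA 0 t := by
  by_cases h0 : t = "cocktail_bar"; · subst h0; decide
  by_cases h1 : t = "wine_bar"; · subst h1; decide
  by_cases h2 : t = "bar"; · subst h2; decide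
  by_cases h3 : t = "lounge"; · subst h3; decide
  by_cases h4 : t = "fine_dining_restaurant"; · subst h4; decide
  by_cases h5 : t = "restaurant"; · subst h5; decide
  by_cases h6 : t = "hotel"; · subst h6; decide
  by_cases h7 : t = "boutique_hotel"; · subst h7; decide
  by_cases h8 : t = "resort_hotel"; · subst h8; decide
  by_cases h9 : t = "night_club"; · subst h9; decide
  by_cases h10 : t = "pub"; · subst h10; decide
  by_cases h11 : t = "cafe"; · subst h11; decide
  simp [pvRank, pvPrioB, pvPrioA, pvRankOf, PySem.List.enumerate, PySem.Dict.get?_insert,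
    h0, h1, h2, h3, h4, h5, h6, h7, h8, h9, h10, h11, Ne.symm]

theorem pvRankOf_ge {l : List String} : ∀ {i r : Int} {t : String},
    pvRankOf l i t = some r → i ≤ r := by
  induction l with
  | nil => intro i r t h; simp [pvRankOf] at h
  | cons p ps ih =>
    intro i r t h
    simp only [pvRankOf] at h
    split at h
    · simp at h; omega
    · have := ih h; omega

theorem pvRankOf_inj {l : List String} : ∀ {i r : Int} {t u : String},
    pvRankOf l i t = some r → pvRankOf l i u = some r → t = u := by
  induction l with
  | nil => intro i r t u h; simp [pvRankOf] at h
  | cons p ps ih =>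
    intro i r t u ht hu
    simp only [pvRankOf] at ht hu
    split at ht <;> split at hu
    case isTrue.isTrue h1 h2 => rw [← h1, ← h2]
    case isTrue.isFalse h1 h2 => simp at ht; have := pvRankOf_ge hu; omega
    case isFalse.isTrue h1 h2 => simp at hu; have := pvRankOf_ge ht; omega
    case isFalse.isFalse => exact ih ht hu

theorem pvRankOf_mem {t : String} : ∀ {l : List String} {i r : Int},
    pvRankOf l i t = some r → t ∈ l := by
  intro l
  induction l with
  | nil => intro i r h; simp [pvRankOf] at h
  | cons p ps ih =>
    intro i r h
    simp only [pvRankOf] at h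
    split at h
    case isTrue he => simp [← he]
    case isFalse => exact List.mem_cons_of_mem _ (ih h)

theorem pvRankOf_append_of_not_mem {t : String} : ∀ {as : List String}, t ∉ as →
    ∀ (l : List String) (i : Int), pvRankOf (as ++ l) i t = pvRankOf l (i + as.length) t := by
  intro as
  induction as with
  | nil => intro _ l i; simp
  | cons p ps ih =>
    intro h l i
    simp only [List.cons_append, pvRankOf]
    rw [if_neg (by simp at h; exact fun e => h.1 e.symm)]
    rw [ih (by simp at h; exact h.2) l (i + 1)]
    congr 1
    simp only [List.length_cons]
    push_cast
    ring

theorem pvRankOf_mem_of_lt {u : String} : ∀ {as l : List String} {i r : Int},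
    pvRankOf (as ++ l) i u = some r → r < i + as.length → u ∈ as := by
  intro as
  induction as with
  | nil => intro l i r h hr; have := pvRankOf_ge h; simp at hr; omega
  | cons p ps ih =>
    intro l i r h hr
    simp only [List.cons_append, pvRankOf] at h
    split at h
    case isTrue he => subst he; simp
    case isFalse he =>
      have : u ∈ ps := ih h (by simp only [List.length_cons] at hr; push_cast at hr ⊢; omega)
      simp [this]

theorem pvScan_some {types : List String} :
    ∀ {l : List String} {p : String}, pvScan types l = some p →
      ∃ as bs, l = as ++ p :: bs ∧ types.contains p = true ∧ ∀ q ∈ as, types.contains q = false := by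
  intro l
  induction l with
  | nil => intro p h; simp [pvScan] at h
  | cons q qs ih =>
    intro p h
    simp only [pvScan] at h
    split at h
    case isTrue hc =>
      cases h
      exact ⟨[], qs, by simp, hc, by simp⟩
    case isFalse hc =>
      obtain ⟨as, bs, rfl, hp, has⟩ := ih h
      exact ⟨q :: as, bs, by simp, hp, by
        intro x hx
        rcases List.mem_cons.mp hx with rfl | hx
        · simpa using hc
        · exact has x hx⟩

theorem pvScan_none {types : List String} :
    ∀ {l : List String}, pvScan types l = none → ∀ q ∈ l, types.contains q = false := by
  intro l
  induction l with
  | nil => intro _ q hq; simp at hq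
  | cons p ps ih =>
    intro h q hq
    simp only [pvScan] at h
    split at h
    · simp at h
    case isFalse hc =>
      rcases List.mem_cons.mp hq with rfl | hq
      · simpa using hc
      · exact ih h q hq

theorem pvFold_inv (l : List String) : ∀ (b : Option (String × Int)),
    (∀ x, b = some x → pvRank.get? x.1 = some x.2) →
    ((l.foldl pvStep b = none → b = none ∧ ∀ u ∈ l, pvRank.get? u = none) ∧
     (∀ x, l.foldl pvStep b = some x →
        pvRank.get? x.1 = some x.2 ∧
        (x.1 ∈ l ∨ b = some x) ∧
        (∀ u s, u ∈ l → pvRank.get? u = some s → x.2 ≤ s) ∧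
        (∀ y, b = some y → x.2 ≤ y.2))) := by
  induction l with
  | nil =>
    intro b hb
    refine ⟨fun h => ⟨by simpa using h, by simp⟩, fun x h => ?_⟩
    simp at h
    exact ⟨hb x h, Or.inr h, by simp, fun y hy => by rw [h] at hy; cases hy; exact le_refl _⟩
  | cons u l' ih =>
    intro b hb
    have hb' : ∀ x, pvStep b u = some x → pvRank.get? x.1 = some x.2 := by
      intro x hx
      unfold pvStep at hx
      split at hx
      · exact hb x hx
      case h_2 r hr =>
        cases b with
        | none => cases hx; exact hr
        | some y =>
          obtain ⟨yt, yr⟩ := y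
          simp at hx
          split at hx
          · cases hx; exact hr
          · exact hb x hx
    obtain ⟨ihn, ihs⟩ := ih (pvStep b u) hb'
    constructor
    · intro h
      simp only [List.foldl_cons] at h
      obtain ⟨hb'n, hl'⟩ := ihn h
      have : b = none ∧ pvRank.get? u = none := by
        unfold pvStep at hb'n
        split at hb'n
        case h_1 hr => exact ⟨hb'n, hr⟩
        case h_2 r hr =>
          cases b with
          | none => simp at hb'n
          | some y =>
            obtain ⟨yt, yr⟩ := y
            simp at hb'n
            split at hb'n <;> simp at hb'n
      exact ⟨this.1, by
        intro v hv
        rcases List.mem_cons.mp hv with rfl | hv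
        · exact this.2
        · exact hl' v hv⟩
    · intro x h
      simp only [List.foldl_cons] at h
      obtain ⟨hx1, hx2, hx3, hx4⟩ := ihs x h
      refine ⟨hx1, ?_, ?_, ?_⟩
      · rcases hx2 with hm | hbx
        · exact Or.inl (List.mem_cons_of_mem _ hm)
        · unfold pvStep at hbx
          split at hbx
          · exact Or.inr hbx
          case h_2 r hr =>
            cases b with
            | none => cases hbx; exact Or.inl (by simp)
            | some y =>
              obtain ⟨yt, yr⟩ := y
              simp at hbx
              split at hbx
              · cases hbx; exact Or.inl (by simp)
              · exact Or.inr (by rw [hbx])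
      · intro v s hv hs
        rcases List.mem_cons.mp hv with rfl | hv
        · unfold pvStep at hx4
          rw [hs] at hx4
          cases b with
          | none => have := hx4 (v, s) rfl; simpa using this
          | some y =>
            obtain ⟨yt, yr⟩ := y
            by_cases hlt : s < yr
            · have := hx4 (v, s) (by simp [hlt]); simpa using this
            · have := hx4 (yt, yr) (by simp [hlt])
              simp at this
              omega
        · exact hx3 v s hv hs
      · intro y hy
        subst hy
        unfold pvStep at hx4
        cases hr : pvRank.get? u with
        | none => rw [hr] at hx4; exact hx4 _ rfl
        | some r =>
          rw [hr] at hx4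
          obtain ⟨yt, yr⟩ := y
          by_cases hlt : r < yr
          · have := hx4 (u, r) (by simp [hlt])
            simp at this
            omega
          · exact hx4 (yt, yr) (by simp [hlt])

-- ===== VERDICT (by name: the statement is the Claim_ definition above) =====
theorem determine_primary_type_py_spec : Claim_equal_determine_primary_type_py := by
  intro types _
  unfold Spec_determine_primary_type_py
  cases types with
  | nil => rfl
  | cons t0 ts =>
    simp only [determine_primary_type_py, determine_primary_type_py_alt]
    obtain ⟨hn, hs⟩ := pvFold_inv (t0 :: ts) none (by simp)
    cases hscan : pvScan (t0 :: ts) pvPrioA with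
    | none =>
      have hall := pvScan_none hscan
      cases hf : (t0 :: ts).foldl pvStep none with
      | none => rfl
      | some x =>
        obtain ⟨hx1, hx2, hx3, hx4⟩ := hs x hf
        rw [pvRank_get?_eq] at hx1
        have hxp : x.1 ∈ pvPrioA := pvRankOf_mem hx1
        have hc := hall x.1 hxp
        have hxmem : x.1 ∈ t0 :: ts := by
          rcases hx2 with h | h
          · exact h
          · cases h
        simp at hc
        rcases List.mem_cons.mp hxmem with h | h
        · exact absurd h hc.1
        · exact absurd h hc.2
    | some p =>
      obtain ⟨as, bs, hdec, hp, has⟩ := pvScan_some hscan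
      have hpmem : p ∈ t0 :: ts := by simpa [List.contains_iff_mem] using hp
      have hrp : pvRankOf pvPrioA 0 p = some as.length := by
        rw [hdec, pvRankOf_append_of_not_mem ?_ (p :: bs) 0]
        · simp [pvRankOf]
        · intro hmem
          have := has p hmem
          rw [hp] at this
          cases this
      cases hf : (t0 :: ts).foldl pvStep none with
      | none =>
        obtain ⟨-, hnone⟩ := hn hf
        have := hnone p hpmem
        rw [pvRank_get?_eq, hrp] at this
        cases this
      | some x =>
        obtain ⟨hx1, hx2, hx3, hx4⟩ := hs x hf
        rw [pvRank_get?_eq] at hx1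
        have hle : x.2 ≤ (as.length : Int) :=
          hx3 p _ hpmem (by rw [pvRank_get?_eq]; exact hrp)
        have hxmem : x.1 ∈ t0 :: ts := by
          rcases hx2 with h | h
          · exact h
          · cases h
        have hge : (as.length : Int) ≤ x.2 := by
          by_contra hlt
          push Not at hlt
          have hxas : x.1 ∈ as := by
            rw [hdec] at hx1
            exact pvRankOf_mem_of_lt hx1 (by omega)
          have hc := has x.1 hxas
          simp at hc
          rcases List.mem_cons.mp hxmem with h | h
          · exact absurd h hc.1
          · exact absurd h hc.2
        have hx2eq : x.2 = (as.length : Int) := le_antisymm hle hge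
        have hxp : x.1 = p := by
          apply pvRankOf_inj (hx2eq ▸ hx1) hrp
        obtain ⟨xt, xr⟩ := x
        simpa using hxp.symm
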